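-- pv_equiv track=rewrite | github.com/LithuanianMathemator/Programmieraufgaben | programmieraufgabe112.py | maxunimod
-- ===== SOURCE A (Python) =====
-- def maxunimod(L):
--
--     if len(L) == 1:
--         return 1
--         # just one element: just one sequence with length 1
--
--     counter = 0
--     # for index of list
--
--     length = 1
--
--     lenlist = []
--     # list for lengths of sequences
--
--     if L[0] <= L[1]:
--         direction = 1
--         # 1: upwards
--
--     if L[0] > L[1]:
--         direction = -1
--         # -1: downwards
--
--     while counter < len(L)-1:
--
--         if direction == 1:
--             if L[counter] <= L[counter+1]:
--                 length += 1
--                 counter += 1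
--             else:
--                 direction = -1
--                 # direction switches
--
--         if direction == -1:
--             if L[counter] >= L[counter+1]:
--                 length += 1
--                 counter += 1
--             else:
--                 # end of sequence
--                 lenlist.append(length)
--                 length = 1
--                 direction = 1
--                 while L[counter] == L[counter-1]:
--                     counter -= 1
--                     # if last elements of sequence were equal, go to the first
--
--     lenlist.append(length)
--     # append last length
--
--     return max(lenlist)
-- ===== SOURCE B (Python) =====
-- def maxunimod(L):
--     n = len(L)
--     inc = []
--     up = 0
--     for i in range(n):
--         up = up + 1 if i > 0 and L[i-1] <= L[i] else 1
--         inc.append(up)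
--     dec = []
--     down = 0
--     for i in range(n-1, -1, -1):
--         down = down + 1 if i < n - 1 and L[i] >= L[i+1] else 1
--         dec.append(down)
--     dec.reverse()
--     return max(inc[i] + dec[i] - 1 for i in range(n))
-- ===== Notes on version B (the rewrite author's own statement) =====
-- stated objective: simpler
-- what changed: Replaces the stateful direction-switching scan with plateau backtracking by the classic two-pass longest-bitonic-subarray method: a forward pass of nondecreasing run lengths, a backward pass of nonincreasing run lengths, and max(inc[i]+dec[i]-1).
import Mathlib
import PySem

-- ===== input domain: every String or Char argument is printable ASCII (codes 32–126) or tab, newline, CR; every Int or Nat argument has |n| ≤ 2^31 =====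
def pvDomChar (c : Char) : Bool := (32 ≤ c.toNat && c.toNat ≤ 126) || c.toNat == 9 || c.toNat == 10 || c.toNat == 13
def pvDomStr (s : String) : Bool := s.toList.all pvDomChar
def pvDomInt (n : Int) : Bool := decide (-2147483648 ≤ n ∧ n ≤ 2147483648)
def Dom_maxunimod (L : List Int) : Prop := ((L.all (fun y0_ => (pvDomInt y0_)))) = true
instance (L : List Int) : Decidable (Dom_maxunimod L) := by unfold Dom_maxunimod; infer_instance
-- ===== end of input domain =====

-- B replaces A's stateful direction-switching scan (with plateau backtracking) by the classic
-- two-pass longest-bitonic-subarray computation; objective: simpler (same O(n) cost).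

-- ===== PORT A =====
-- List indexing: every index A evaluates is provably in range on the admitted (nonempty) inputs,
-- so it is ported as getD (Python raises only outside Pre_, i.e. on []).
def pvGl (L : List Int) (i : Nat) : Int := L.getD i 0

theorem pvSub1 (n c : Nat) (h : c + 1 < n) : n - (c + 1) < n - c :=
  Nat.sub_succ_lt_self n c (Nat.lt_of_succ_lt h)

theorem pvPredLt (c : Nat) (h : ¬ c = 0) : c - 1 < c := Nat.pred_lt h

-- termination measure helpers for A's while loop (not part of the computation of the result):
-- pvFirstDown c = first i ≥ c where the ascent stops, pvFirstUp c = first i ≥ c where a descent stops.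
def pvFirstDown (L : List Int) (c : Nat) : Nat :=
  if _h : c + 1 < L.length then
    (if pvGl L (c+1) < pvGl L c then c else pvFirstDown L (c+1))
  else c
termination_by L.length - c
decreasing_by exact pvSub1 _ _ _h

def pvFirstUp (L : List Int) (c : Nat) : Nat :=
  if _h : c + 1 < L.length then
    (if pvGl L c < pvGl L (c+1) then c else pvFirstUp L (c+1))
  else c
termination_by L.length - c
decreasing_by exact pvSub1 _ _ _h

-- the inner `while L[counter] == L[counter-1]: counter -= 1` (the 0-guard is unreachable on
-- admitted inputs: every rewind stops at the strict drop that started the descent)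
def pvRewind (L : List Int) (c : Nat) : Nat :=
  if c = 0 then 0
  else if pvGl L c = pvGl L (c-1) then pvRewind L (c-1) else c
termination_by c
decreasing_by rename_i h _; exact pvPredLt _ h

theorem pvFirstDown_ge (L : List Int) (c : Nat) : c ≤ pvFirstDown L c := by
  unfold pvFirstDown
  split
  · split
    · exact Nat.le_refl c
    · exact Nat.le_trans (Nat.le_succ c) (pvFirstDown_ge L (c+1))
  · exact Nat.le_refl c
termination_by L.length - c
decreasing_by rename_i h _; exact pvSub1 _ _ h

theorem pvFirstUp_ge (L : List Int) (c : Nat) : c ≤ pvFirstUp L c := by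
  unfold pvFirstUp
  split
  · split
    · exact Nat.le_refl c
    · exact Nat.le_trans (Nat.le_succ c) (pvFirstUp_ge L (c+1))
  · exact Nat.le_refl c
termination_by L.length - c
decreasing_by rename_i h _; exact pvSub1 _ _ h

theorem pvRewind_le (L : List Int) (c : Nat) : pvRewind L c ≤ c := by
  unfold pvRewind
  split
  · exact Nat.zero_le c
  · split
    · exact Nat.le_trans (pvRewind_le L (c-1)) (Nat.pred_le c)
    · exact Nat.le_refl c
termination_by c
decreasing_by rename_i h _; exact pvPredLt _ h

theorem pvRewind_plateau (L : List Int) (c : Nat) :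
    ∀ j, pvRewind L c < j → j ≤ c → pvGl L (j-1) = pvGl L j := by
  unfold pvRewind
  split
  · rename_i hc0
    intro j hj1 hj2
    rw [hc0] at hj2
    exact absurd (Nat.lt_of_lt_of_le hj1 hj2) (Nat.lt_irrefl 0)
  · rename_i hc0
    split
    · rename_i heq
      intro j hj1 hj2
      rcases Nat.lt_or_ge j c with h | h
      · exact pvRewind_plateau L (c-1) j hj1 (Nat.le_pred_of_lt h)
      · have hjc : j = c := Nat.le_antisymm hj2 h
        subst hjc
        exact heq.symm
    · intro j hj1 hj2
      exact absurd (Nat.lt_of_lt_of_le hj1 hj2) (Nat.lt_irrefl _)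
termination_by c
decreasing_by exact pvPredLt _ ‹¬ c = 0›

theorem pvFirstDown_step (L : List Int) (c : Nat) (h1 : c + 1 < L.length)
    (h2 : ¬ pvGl L (c+1) < pvGl L c) : pvFirstDown L c = pvFirstDown L (c+1) := by
  rw [pvFirstDown, dif_pos h1, if_neg h2]

theorem pvFirstDown_stop (L : List Int) (c : Nat) (h1 : c + 1 < L.length)
    (h2 : pvGl L (c+1) < pvGl L c) : pvFirstDown L c = c := by
  rw [pvFirstDown, dif_pos h1, if_pos h2]

theorem pvFirstUp_step (L : List Int) (c : Nat) (h1 : c + 1 < L.length)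
    (h2 : ¬ pvGl L c < pvGl L (c+1)) : pvFirstUp L c = pvFirstUp L (c+1) := by
  rw [pvFirstUp, dif_pos h1, if_neg h2]

theorem pvFirstUp_stop (L : List Int) (c : Nat) (h1 : c + 1 < L.length)
    (h2 : pvGl L c < pvGl L (c+1)) : pvFirstUp L c = c := by
  rw [pvFirstUp, dif_pos h1, if_pos h2]

theorem pvFirstDown_congr (L : List Int) :
    ∀ (d a : Nat), a + d + 1 ≤ L.length →
      (∀ j, a ≤ j → j < a + d → pvGl L j ≤ pvGl L (j+1)) →
      pvFirstDown L a = pvFirstDown L (a + d) := by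
  intro d
  induction d with
  | zero => intro a _ _; rfl
  | succ d ih =>
    intro a hlen hmono
    have e1 : a + 1 + d = a + (d + 1) := Nat.add_right_comm a 1 d
    have h1 : a + 1 < L.length :=
      Nat.lt_of_lt_of_le (by rw [Nat.add_right_comm]; exact Nat.lt_add_of_pos_right (Nat.succ_pos d)) hlen
    have h2 : ¬ (pvGl L (a+1) < pvGl L a) :=
      not_lt.mpr (hmono a (Nat.le_refl a) (Nat.lt_add_of_pos_right (Nat.succ_pos d)))
    rw [pvFirstDown_step L a h1 h2]
    have hlen' : a + 1 + d + 1 ≤ L.length := by rw [e1]; exact hlen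
    have hmono' : ∀ j, a + 1 ≤ j → j < a + 1 + d → pvGl L j ≤ pvGl L (j+1) :=
      fun j hj1 hj2 => hmono j (Nat.le_of_succ_le hj1) (e1 ▸ hj2)
    rw [ih (a+1) hlen' hmono', e1]

-- decrease facts for the five recursive calls of A's loop (cited by its decreasing_by)
theorem pvLoopDec1 (L : List Int) (c : Nat) (h : c < L.length - 1)
    (hle : pvGl L c ≤ pvGl L (c+1)) :
    Prod.Lex (fun a₁ a₂ : Nat => a₁ < a₂) (fun a₁ a₂ : Nat => a₁ < a₂)
      (L.length - pvFirstUp L (pvFirstDown L (c+1)), L.length - (c+1))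
      (L.length - pvFirstUp L (pvFirstDown L c), L.length - c) := by
  have h1 : c + 1 < L.length := Nat.add_lt_of_lt_sub h
  rw [pvFirstDown_step L c h1 (not_lt.mpr hle)]
  exact Prod.Lex.right _ (pvSub1 _ _ h1)

theorem pvLoopDec2 (L : List Int) (c : Nat) (h : c < L.length - 1)
    (hnle : ¬ pvGl L c ≤ pvGl L (c+1)) :
    Prod.Lex (fun a₁ a₂ : Nat => a₁ < a₂) (fun a₁ a₂ : Nat => a₁ < a₂)
      (L.length - pvFirstUp L (c+1), L.length - (c+1))
      (L.length - pvFirstUp L (pvFirstDown L c), L.length - c) := by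
  have h1 : c + 1 < L.length := Nat.add_lt_of_lt_sub h
  have hlt : pvGl L (c+1) < pvGl L c := not_le.mp hnle
  rw [pvFirstDown_stop L c h1 hlt, pvFirstUp_step L c h1 (not_lt.mpr (le_of_lt hlt))]
  exact Prod.Lex.right _ (pvSub1 _ _ h1)

theorem pvLoopDec3 (a b : Int) (h1 : ¬ a ≤ b) (h2 : ¬ a ≥ b) : False :=
  h2 (le_of_lt (not_le.mp h1))

theorem pvLoopDec4 (L : List Int) (c : Nat) (h : c < L.length - 1)
    (hge : pvGl L c ≥ pvGl L (c+1)) :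
    Prod.Lex (fun a₁ a₂ : Nat => a₁ < a₂) (fun a₁ a₂ : Nat => a₁ < a₂)
      (L.length - pvFirstUp L (c+1), L.length - (c+1))
      (L.length - pvFirstUp L c, L.length - c) := by
  have h1 : c + 1 < L.length := Nat.add_lt_of_lt_sub h
  rw [pvFirstUp_step L c h1 (not_lt.mpr hge)]
  exact Prod.Lex.right _ (pvSub1 _ _ h1)

theorem pvLoopDec5 (L : List Int) (c : Nat) (h : c < L.length - 1)
    (hnge : ¬ pvGl L c ≥ pvGl L (c+1)) :
    Prod.Lex (fun a₁ a₂ : Nat => a₁ < a₂) (fun a₁ a₂ : Nat => a₁ < a₂)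
      (L.length - pvFirstUp L (pvFirstDown L (pvRewind L c)), L.length - pvRewind L c)
      (L.length - pvFirstUp L c, L.length - c) := by
  have h1 : c + 1 < L.length := Nat.add_lt_of_lt_sub h
  have hlt : pvGl L c < pvGl L (c+1) := lt_of_not_ge hnge
  have hplat := pvRewind_plateau L c
  have hrle : pvRewind L c ≤ c := pvRewind_le L c
  have hadd : pvRewind L c + (c + 1 - pvRewind L c) = c + 1 :=
    Nat.add_sub_cancel' (Nat.le_trans hrle (Nat.le_succ c))
  have hcongr : pvFirstDown L (pvRewind L c) = pvFirstDown L (c+1) := by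
    have heq := pvFirstDown_congr L (c + 1 - pvRewind L c) (pvRewind L c)
      (by rw [hadd]; exact Nat.succ_le_of_lt h1)
      (by
        intro j hj1 hj2
        rw [hadd] at hj2
        rcases Nat.lt_or_ge j c with hj | hj
        · exact le_of_eq (hplat (j+1) (Nat.lt_succ_of_le hj1) (Nat.succ_le_of_lt hj))
        · have hjc : j = c := Nat.le_antisymm (Nat.le_of_lt_succ hj2) hj
          rw [hjc]
          exact le_of_lt hlt)
    rw [heq, hadd]
  rw [pvFirstUp_stop L c h1 hlt, hcongr]
  apply Prod.Lex.left
  have hge1 : c + 1 ≤ pvFirstDown L (c+1) := pvFirstDown_ge L (c+1)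
  have hge2 : pvFirstDown L (c+1) ≤ pvFirstUp L (pvFirstDown L (c+1)) := pvFirstUp_ge L _
  exact Nat.lt_of_le_of_lt
    (Nat.sub_le_sub_left (Nat.le_trans hge1 hge2) L.length)
    (pvSub1 _ _ h1)

-- A's while loop: state (counter, length, direction, lenlist); the two sequential `if`s of the
-- body are transcribed with Python's fall-through (direction switching to -1 runs the second if).
def maxunimodLoop (L : List Int) (c : Nat) (len : Int) (dir : Int) (acc : List Int) : List Int :=
  if _h : c < L.length - 1 then
    if dir = 1 then
      if pvGl L c ≤ pvGl L (c+1) then maxunimodLoop L (c+1) (len+1) 1 acc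
      else -- direction := -1, fall through into the second if
        if pvGl L c ≥ pvGl L (c+1) then maxunimodLoop L (c+1) (len+1) (-1) acc
        else maxunimodLoop L (pvRewind L c) 1 1 (acc ++ [len])
    else
      if pvGl L c ≥ pvGl L (c+1) then maxunimodLoop L (c+1) (len+1) (-1) acc
      else maxunimodLoop L (pvRewind L c) 1 1 (acc ++ [len])
  else acc ++ [len]
termination_by (L.length - (if dir = 1 then pvFirstUp L (pvFirstDown L c) else pvFirstUp L c), L.length - c)
decreasing_by
  · rename_i hdir hle
    simp only [hdir, reduceIte]
    exact pvLoopDec1 L c _h hle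
  · rename_i hdir hnle hge
    simp only [hdir, reduceIte]
    exact pvLoopDec2 L c _h hnle
  · rename_i hdir hnle hnge
    exact (pvLoopDec3 _ _ hnle hnge).elim
  · rename_i hdir hge
    simp only [if_neg hdir, reduceIte]
    exact pvLoopDec4 L c _h hge
  · rename_i hdir hnge
    simp only [if_neg hdir, reduceIte]
    exact pvLoopDec5 L c _h hnge

def maxunimod (L : List Int) : Int :=
  if L.length = 1 then 1
  else
    -- exactly one of A's two initial ifs fires (total order on Int)
    let dir : Int := if pvGl L 0 ≤ pvGl L 1 then 1 else -1
    (PySem.List.max? (maxunimodLoop L 0 1 dir []) (fun y => y)).getD 0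

-- ===== PORT B =====
def maxunimod_alt (L : List Int) : Int :=
  let n := L.length
  let incp := (List.range n).foldl
    (fun (s : Int × List Int) i =>
      let up := if 0 < i ∧ pvGl L (i-1) ≤ pvGl L i then s.1 + 1 else 1
      (up, s.2 ++ [up])) (0, [])
  let decp := (List.range n).reverse.foldl
    (fun (s : Int × List Int) i =>
      let down := if i < n - 1 ∧ pvGl L (i+1) ≤ pvGl L i then s.1 + 1 else 1
      (down, s.2 ++ [down])) (0, [])
  let dec := decp.2.reverse
  (PySem.List.max? ((List.range n).map (fun i => incp.2.getD i 0 + dec.getD i 0 - 1))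
    (fun y => y)).getD 0

-- ===== PRECONDITION & SPEC =====
-- Pre_ excludes only the empty list, on which A raises IndexError (L[0]) and B raises ValueError.
def Pre_maxunimod (L : List Int) : Prop := L ≠ []
instance (L : List Int) : Decidable (Pre_maxunimod L) := by unfold Pre_maxunimod; infer_instance
def pvWitness_maxunimod : List Int := [2, 5, 5, 1, 3]

def Spec_maxunimod (L : List Int) (out : Int) : Prop := out = maxunimod_alt L
instance (L : List Int) (out : Int) : Decidable (Spec_maxunimod L out) := by unfold Spec_maxunimod; infer_instance

-- ===== CLAIM (what is proved, stated in full; the proofs are below) =====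
def Claim_equal_maxunimod : Prop := ∀ (L : List Int), Dom_maxunimod L → Pre_maxunimod L → Spec_maxunimod L (maxunimod L)

-- ===== LEMMAS AND PROOFS =====

-- length of the longest nondecreasing run ending at i
def pvIncl (L : List Int) : Nat → Int
  | 0 => 1
  | (i+1) => if pvGl L i ≤ pvGl L (i+1) then pvIncl L i + 1 else 1

-- length of the longest nonincreasing run starting at i
def pvDecl (L : List Int) (i : Nat) : Int :=
  if _h : i + 1 < L.length ∧ pvGl L (i+1) ≤ pvGl L i then pvDecl L (i+1) + 1 else 1
termination_by L.length - i
decreasing_by exact pvSub1 _ _ _h.1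

def pvV (L : List Int) (i : Nat) : Int := pvIncl L i + pvDecl L i - 1

-- maximum of pvV over [i, n)
def pvM (L : List Int) (i : Nat) : Int :=
  if _h : i + 1 < L.length then max (pvV L i) (pvM L (i+1)) else pvV L i
termination_by L.length - i
decreasing_by exact pvSub1 _ _ _h

def pvMx (l : List Int) : Int := (PySem.List.max? l (fun y => y)).getD 0

theorem pv_foldl_max_comm (t : List Int) : ∀ a b, t.foldl max (max a b) = max a (t.foldl max b) := by
  induction t with
  | nil => intro a b; simp
  | cons c t ih =>
    intro a b
    simp only [List.foldl_cons]
    rw [max_assoc, ih]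

theorem pvMx_cons (a : Int) (l : List Int) (h : l ≠ []) : pvMx (a :: l) = max a (pvMx l) := by
  match l with
  | [] => exact absurd rfl h
  | b :: t =>
    simp only [pvMx, PySem.List.max?_id_cons, Option.getD_some, List.foldl_cons]
    rw [pv_foldl_max_comm]

theorem pvMx_singleton (a : Int) : pvMx [a] = a := by
  simp [pvMx, PySem.List.max?_id_cons]

theorem pvIncl_pos (L : List Int) (i : Nat) : 1 ≤ pvIncl L i := by
  induction i with
  | zero => simp [pvIncl]
  | succ i ih =>
    simp only [pvIncl]
    split
    · omega
    · omega

theorem pvDecl_pos (L : List Int) (i : Nat) : 1 ≤ pvDecl L i := by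
  rw [pvDecl]
  split
  · have := pvDecl_pos L (i+1)
    omega
  · omega
termination_by L.length - i
decreasing_by rename_i h; omega

theorem pvV_up (L : List Int) (i : Nat) (h1 : i + 1 < L.length) (h2 : pvGl L i ≤ pvGl L (i+1)) :
    pvV L i ≤ pvV L (i+1) := by
  have hpos := pvDecl_pos L (i+1)
  have hi : pvIncl L (i+1) = pvIncl L i + 1 := by
    simp only [pvIncl, if_pos h2]
  unfold pvV
  rw [hi, pvDecl]
  split
  · omega
  · omega

theorem pvV_down (L : List Int) (i : Nat) (h1 : i + 1 < L.length) (h2 : pvGl L (i+1) ≤ pvGl L i) :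
    pvV L (i+1) ≤ pvV L i := by
  have hpos := pvIncl_pos L i
  have hd : pvDecl L i = pvDecl L (i+1) + 1 := by
    rw [pvDecl, dif_pos ⟨h1, h2⟩]
  unfold pvV
  rw [hd]
  simp only [pvIncl]
  split
  · omega
  · omega

theorem pvV_chain_down (L : List Int) (q b : Nat) (hqb : q ≤ b) (hb : b < L.length)
    (hch : ∀ j, q < j → j ≤ b → pvGl L j ≤ pvGl L (j-1)) : pvV L b ≤ pvV L q := by
  rcases eq_or_lt_of_le hqb with h | h
  · subst h; exact le_refl _
  · have h2 : pvGl L (q+1) ≤ pvGl L q := by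
      have := hch (q+1) (by omega) (by omega)
      simpa using this
    exact le_trans
      (pvV_chain_down L (q+1) b (by omega) hb (fun j hj1 hj2 => hch j (by omega) hj2))
      (pvV_down L q (by omega) h2)
termination_by b - q
decreasing_by omega

theorem pvV_le_M (L : List Int) (a i : Nat) (h1 : a ≤ i) (h2 : i < L.length) :
    pvV L i ≤ pvM L a := by
  rw [pvM]
  split
  · rcases eq_or_lt_of_le h1 with h | h
    · subst h
      exact le_max_left _ _
    · exact le_trans (pvV_le_M L (a+1) i (by omega) h2) (le_max_right _ _)
  · have : i = a := by omega
    subst this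
    exact le_refl _
termination_by L.length - a
decreasing_by rename_i h _; omega

theorem pvM_le_back (L : List Int) (a b : Nat) (h1 : a ≤ b) (h2 : b < L.length) :
    pvM L b ≤ pvM L a := by
  rcases eq_or_lt_of_le h1 with h | h
  · subst h; exact le_refl _
  · conv_rhs => rw [pvM]
    split
    · exact le_trans (pvM_le_back L (a+1) b (by omega) h2) (le_max_right _ _)
    · omega
termination_by L.length - a
decreasing_by rename_i h _ _; omega

theorem pvM_le_of_ub (L : List Int) (a : Nat) (K : Int) (ha : a < L.length)
    (h : ∀ i, a ≤ i → i < L.length → pvV L i ≤ K) : pvM L a ≤ K := by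
  rw [pvM]
  split
  · exact max_le (h a (le_refl a) ha)
      (pvM_le_of_ub L (a+1) K (by omega) (fun i hi1 hi2 => h i (by omega) hi2))
  · exact h a (le_refl a) ha
termination_by L.length - a
decreasing_by rename_i h' _; omega

theorem pvM_merge (L : List Int) (q b : Nat) (h1 : q ≤ b) (h2 : b < L.length)
    (hdom : ∀ i, q ≤ i → i < b → pvV L i ≤ pvV L q) :
    pvM L q = max (pvV L q) (pvM L b) := by
  apply le_antisymm
  · apply pvM_le_of_ub L q _ (by omega)
    intro i hi1 hi2
    rcases Nat.lt_or_ge i b with hib | hib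
    · exact le_trans (hdom i hi1 hib) (le_max_left _ _)
    · exact le_trans (pvV_le_M L b i hib hi2) (le_max_right _ _)
  · exact max_le (pvV_le_M L q q (le_refl q) (by omega)) (pvM_le_back L q b h1 h2)

theorem pvM_up (L : List Int) (c : Nat) (h1 : c + 1 < L.length) (h2 : pvGl L c ≤ pvGl L (c+1)) :
    pvM L c = pvM L (c+1) := by
  apply le_antisymm
  · apply pvM_le_of_ub L c _ (by omega)
    intro i hi1 hi2
    rcases Nat.lt_or_ge i (c+1) with hic | hic
    · have : i = c := by omega
      subst this
      exact le_trans (pvV_up L i h1 h2) (pvV_le_M L (i+1) (i+1) (le_refl _) h1)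
    · exact pvV_le_M L (c+1) i hic hi2
  · exact pvM_le_back L c (c+1) (by omega) h1

theorem pvM_dom (L : List Int) (q : Nat) (hq : q < L.length)
    (hdom : ∀ i, q < i → i < L.length → pvV L i ≤ pvV L q) : pvM L q = pvV L q := by
  apply le_antisymm
  · apply pvM_le_of_ub L q _ hq
    intro i hi1 hi2
    rcases eq_or_lt_of_le hi1 with h | h
    · subst h; exact le_refl _
    · exact hdom i h hi2
  · exact pvV_le_M L q q (le_refl q) hq

theorem pvDecl_chain (L : List Int) (q c : Nat) (h1 : q ≤ c) (h2 : c < L.length)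
    (hch : ∀ j, q < j → j ≤ c → pvGl L j ≤ pvGl L (j-1))
    (hend : c + 1 = L.length ∨ pvGl L c < pvGl L (c+1)) :
    pvDecl L q = ((c - q : Nat) : Int) + 1 := by
  rcases eq_or_lt_of_le h1 with h | h
  · subst h
    rw [pvDecl, dif_neg]
    · simp
    · rcases hend with h | h
      · intro hcontra; omega
      · intro hcontra; omega
  · have hstep : pvDecl L q = pvDecl L (q+1) + 1 := by
      rw [pvDecl, dif_pos ⟨by omega, by
        have := hch (q+1) (by omega) (by omega)
        simpa using this⟩]
    have ih := pvDecl_chain L (q+1) c (by omega) h2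
      (fun j hj1 hj2 => hch j (by omega) hj2) hend
    rw [hstep, ih]
    omega
termination_by c - q
decreasing_by omega

theorem pvRewind_stop (L : List Int) (c : Nat) :
    pvRewind L c = 0 ∨ pvGl L (pvRewind L c) ≠ pvGl L (pvRewind L c - 1) := by
  unfold pvRewind
  split
  · left; rfl
  · split
    · exact pvRewind_stop L (c-1)
    · right; assumption

-- main characterisation of A's loop: started ascending with len = pvIncl c it computes the
-- maximum of pvV over [c, n); started descending from peak q it computes it over [q, n).
theorem loop_main (L : List Int) : ∀ (c : Nat) (len dir : Int) (acc : List Int),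
    c < L.length →
    ((dir = 1 → len = pvIncl L c →
      ∃ segs, maxunimodLoop L c len dir acc = acc ++ segs ∧ segs ≠ [] ∧ pvMx segs = pvM L c)
    ∧ (dir = -1 → ∀ q, q ≤ c → q + 1 < L.length → pvGl L (q+1) < pvGl L q →
      (∀ j, q < j → j ≤ c → pvGl L j ≤ pvGl L (j-1)) →
      len = pvIncl L q + ((c - q : Nat) : Int) →
      ∃ segs, maxunimodLoop L c len dir acc = acc ++ segs ∧ segs ≠ [] ∧ pvMx segs = pvM L q)) := by
  intro c len dir acc
  induction c, len, dir, acc using maxunimodLoop.induct (L := L) with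
  | case1 c len acc h hle ih =>
    intro _hc
    constructor
    · intro _ hlen
      have hi : pvIncl L (c+1) = pvIncl L c + 1 := by
        simp only [pvIncl, if_pos hle]
      have hcc : c + 1 < L.length := Nat.add_lt_of_lt_sub h
      have ih' := (ih hcc).1 rfl (show len + 1 = pvIncl L (c+1) by rw [hi, hlen])
      obtain ⟨segs, heq, hne, hmx⟩ := ih'
      refine ⟨segs, ?_, hne, ?_⟩
      · rw [maxunimodLoop, dif_pos h, if_pos rfl, if_pos hle]
        exact heq
      · rw [hmx, pvM_up L c hcc hle]
    · intro hcontra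
      exact absurd hcontra (by decide)
  | case2 c len acc h hnle hge ih =>
    intro _hc
    constructor
    · intro _ hlen
      have hchain : ∀ j, c < j → j ≤ c + 1 → pvGl L j ≤ pvGl L (j-1) := by
        intro j hj1 hj2
        have : j = c + 1 := by omega
        subst this
        simpa using hge
      have ih' := (ih (show c + 1 < L.length by omega)).2 rfl c (by omega) (by omega)
        (by omega) hchain (show len + 1 = pvIncl L c + ((c + 1 - c : Nat) : Int) by simp [hlen])
      obtain ⟨segs, heq, hne, hmx⟩ := ih'
      refine ⟨segs, ?_, hne, hmx⟩
      rw [maxunimodLoop, dif_pos h, if_pos rfl, if_neg hnle, if_pos hge]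
      exact heq
    · intro hcontra
      exact absurd hcontra (by decide)
  | case3 c len acc h hnle hnge ih =>
    intro _hc
    constructor
    · intro _ _
      exfalso
      omega
    · intro hcontra
      exact absurd hcontra (by decide)
  | case4 c len dir acc h hndir hge ih =>
    intro _hc
    constructor
    · intro hdir
      exact absurd hdir hndir
    · intro hdir q hq hqn hdrop hch hlen
      have hchain : ∀ j, q < j → j ≤ c + 1 → pvGl L j ≤ pvGl L (j-1) := by
        intro j hj1 hj2
        rcases Nat.lt_or_ge j (c+1) with hj | hj
        · exact hch j hj1 (by omega)
        · have : j = c + 1 := by omega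
          subst this
          simpa using hge
      have ih' := (ih (show c + 1 < L.length by omega)).2 rfl q (by omega) hqn hdrop hchain
        (show len + 1 = pvIncl L q + ((c + 1 - q : Nat) : Int) by rw [hlen]; omega)
      obtain ⟨segs, heq, hne, hmx⟩ := ih'
      refine ⟨segs, ?_, hne, hmx⟩
      rw [maxunimodLoop, dif_pos h, if_neg hndir, if_pos hge]
      exact heq
  | case5 c len dir acc h hndir hnge ih =>
    intro _hc
    constructor
    · intro hdir
      exact absurd hdir hndir
    · intro hdir q hq hqn hdrop hch hlen
      have hlt : pvGl L c < pvGl L (c+1) := by omega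
      rcases eq_or_lt_of_le hq with hqc | hqc
      · subst hqc
        exfalso
        omega
      · have hrle := pvRewind_le L c
        have hplat := pvRewind_plateau L c
        set c' := pvRewind L c with hc'
        have hc'q : q + 1 ≤ c' := by
          by_contra hcon
          have := hplat (q+1) (by omega) (by omega)
          simp at this
          omega
        have hstop : pvGl L c' ≠ pvGl L (c'-1) := by
          rcases pvRewind_stop L c with h0 | h0
          · omega
          · exact h0
        have hstrict : pvGl L c' < pvGl L (c'-1) := by
          rcases eq_or_lt_of_le hc'q with hqc' | hqc'
          · have h1 : c' - 1 = q := by omega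
            have h2 : c' = q + 1 := by omega
            rw [h1, h2]
            exact hdrop
          · have := hch c' (by omega) (by omega)
            omega
        have hincl : pvIncl L c' = 1 := by
          obtain ⟨k, hk⟩ : ∃ k, c' = k + 1 := ⟨c' - 1, by omega⟩
          have hs : pvGl L (k+1) < pvGl L k := by
            have h' := hstrict
            rw [hk] at h'
            simpa using h'
          rw [hk]
          simp only [pvIncl]
          rw [if_neg (by omega)]
        have ih' := (ih (show pvRewind L c < L.length by omega)).1 rfl hincl.symm
        obtain ⟨segs', heq, hne, hmx⟩ := ih'
        refine ⟨len :: segs', ?_, by simp, ?_⟩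
        · rw [maxunimodLoop, dif_pos h, if_neg hndir, if_neg hnge]
          rw [heq]
          simp
        · rw [pvMx_cons len segs' hne, hmx]
          have hdecl : pvDecl L q = ((c - q : Nat) : Int) + 1 :=
            pvDecl_chain L q c (by omega) (by omega) hch (Or.inr hlt)
          have hlenv : len = pvV L q := by
            unfold pvV
            rw [hdecl, hlen]
            ring
          have hdom : ∀ i, q ≤ i → i < c' → pvV L i ≤ pvV L q := by
            intro i hi1 hi2
            exact pvV_chain_down L q i hi1 (by omega)
              (fun j hj1 hj2 => hch j hj1 (by omega))
          rw [hlenv, ← pvM_merge L q c' (by omega) (by omega) hdom]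
  | case6 c len dir acc hnh =>
    intro hc
    have hcn : c = L.length - 1 := by omega
    constructor
    · intro hdir hlen
      refine ⟨[len], ?_, by simp, ?_⟩
      · rw [maxunimodLoop, dif_neg hnh]
      · rw [pvMx_singleton]
        have hdecl : pvDecl L c = 1 := by
          rw [pvDecl, dif_neg]
          intro hcon
          omega
        rw [pvM, dif_neg (by omega)]
        unfold pvV
        rw [hdecl, hlen]
        ring
    · intro hdir q hq hqn hdrop hch hlen
      refine ⟨[len], ?_, by simp, ?_⟩
      · rw [maxunimodLoop, dif_neg hnh]
      · rw [pvMx_singleton]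
        have hdecl : pvDecl L q = ((c - q : Nat) : Int) + 1 :=
          pvDecl_chain L q c hq (by omega) hch (Or.inl (by omega))
        have hdom : ∀ i, q < i → i < L.length → pvV L i ≤ pvV L q := by
          intro i hi1 hi2
          exact pvV_chain_down L q i (by omega) hi2
            (fun j hj1 hj2 => hch j hj1 (by omega))
        rw [pvM_dom L q (by omega) hdom]
        unfold pvV
        rw [hdecl, hlen]
        ring

theorem portA_eq_M (L : List Int) (h : L ≠ []) : maxunimod L = pvM L 0 := by
  have hn : 1 ≤ L.length := List.length_pos_iff.mpr h
  by_cases h1 : L.length = 1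
  · rw [maxunimod, if_pos h1, pvM, dif_neg (by omega)]
    unfold pvV
    rw [pvDecl, dif_neg (by intro hcon; omega)]
    simp [pvIncl]
  · have hn2 : 2 ≤ L.length := by omega
    rw [maxunimod, if_neg h1]
    by_cases hle : pvGl L 0 ≤ pvGl L 1
    · simp only [if_pos hle]
      obtain ⟨segs, heq, _hne, hmx⟩ := (loop_main L 0 1 1 [] (by omega)).1 rfl (by simp [pvIncl])
      show pvMx (maxunimodLoop L 0 1 1 []) = pvM L 0
      rw [heq, List.nil_append, hmx]
    · simp only [if_neg hle]
      obtain ⟨segs, heq, _hne, hmx⟩ := (loop_main L 0 1 (-1) [] (by omega)).2 rfl 0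
        (le_refl 0) (by omega) (by simpa using (show pvGl L 1 < pvGl L 0 by omega)) (by intro j hj1 hj2; omega) (by simp [pvIncl])
      show pvMx (maxunimodLoop L 0 1 (-1) []) = pvM L 0
      rw [heq, List.nil_append, hmx]

theorem incFold (L : List Int) : ∀ k, 1 ≤ k →
    (List.range k).foldl
      (fun (s : Int × List Int) i =>
        let up := if 0 < i ∧ pvGl L (i-1) ≤ pvGl L i then s.1 + 1 else 1
        (up, s.2 ++ [up])) (0, [])
    = (pvIncl L (k-1), (List.range k).map (pvIncl L)) := by
  intro k
  induction k with
  | zero => omega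
  | succ k ih =>
    intro _
    rcases Nat.eq_zero_or_pos k with hk | hk
    · subst hk
      simp [List.range_succ, pvIncl]
    · rw [List.range_succ, List.foldl_append, ih hk, List.map_append]
      obtain ⟨j, hj⟩ : ∃ j, k = j + 1 := ⟨k - 1, by omega⟩
      subst hj
      simp only [List.foldl_cons, List.foldl_nil, Nat.add_sub_cancel]
      have hup : (if 0 < j + 1 ∧ pvGl L j ≤ pvGl L (j+1) then pvIncl L j + 1 else 1)
          = pvIncl L (j+1) := by
        by_cases hle : pvGl L j ≤ pvGl L (j+1)
        · rw [if_pos ⟨by omega, hle⟩]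
          simp [pvIncl, if_pos hle]
        · rw [if_neg (by tauto)]
          simp [pvIncl, if_neg hle]
      rw [hup]
      simp
  
theorem decFold (L : List Int) : ∀ j, j ≤ L.length - 1 → ∀ (acc : List Int),
    (List.range j).reverse.foldl
      (fun (s : Int × List Int) i =>
        (if i < L.length - 1 ∧ pvGl L (i+1) ≤ pvGl L i then s.1 + 1 else 1,
         s.2 ++ [if i < L.length - 1 ∧ pvGl L (i+1) ≤ pvGl L i then s.1 + 1 else 1])) (pvDecl L j, acc)
    = (pvDecl L 0, acc ++ (List.range j).reverse.map (pvDecl L)) := by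
  intro j
  induction j with
  | zero =>
    intro _ acc
    simp
  | succ j ih =>
    intro hj acc
    have hrev : (List.range (j+1)).reverse = j :: (List.range j).reverse := by
      rw [List.range_succ]
      simp
    rw [hrev]
    simp only [List.foldl_cons, List.map_cons]
    have hstep : (if j < L.length - 1 ∧ pvGl L (j+1) ≤ pvGl L j then pvDecl L (j+1) + 1 else 1)
        = pvDecl L j := by
      conv_rhs => rw [pvDecl]
      by_cases hcond : j + 1 < L.length ∧ pvGl L (j+1) ≤ pvGl L j
      · rw [dif_pos hcond, if_pos ⟨by omega, hcond.2⟩]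
      · rw [dif_neg hcond, if_neg (by intro hc; exact hcond ⟨by omega, hc.2⟩)]
    rw [hstep, ih (by omega) (acc ++ [pvDecl L j])]
    simp

theorem mapRange_getD (f : Nat → Int) (n i : Nat) (hi : i < n) :
    ((List.range n).map f).getD i 0 = f i := by
  rw [List.getD_eq_getElem?_getD]
  simp [List.getElem?_map, List.getElem?_range hi]

theorem mx_map_range' (L : List Int) : ∀ (d c : Nat), c + (d + 1) = L.length →
    pvMx ((List.range' c (d+1)).map (pvV L)) = pvM L c := by
  intro d
  induction d with
  | zero =>
    intro c hc
    rw [List.range'_one]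
    simp only [List.map_cons, List.map_nil]
    rw [pvMx_singleton, pvM, dif_neg (by omega)]
  | succ d ih =>
    intro c hc
    rw [List.range'_succ]
    simp only [List.map_cons]
    have hne : (List.range' (c+1) (d+1)).map (pvV L) ≠ [] := by
      simp [List.range'_eq_nil_iff]
    rw [pvMx_cons _ _ hne, ih (c+1) (by omega)]
    conv_rhs => rw [pvM]
    rw [dif_pos (show c + 1 < L.length by omega)]

theorem portB_eq_M (L : List Int) (h : L ≠ []) : maxunimod_alt L = pvM L 0 := by
  have hn : 1 ≤ L.length := List.length_pos_iff.mpr h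
  simp only [maxunimod_alt]
  rw [incFold L L.length hn]
  have hrev : (List.range L.length).reverse = (L.length - 1) :: (List.range (L.length - 1)).reverse := by
    conv_lhs => rw [show L.length = (L.length - 1) + 1 by omega, List.range_succ]
    simp
  rw [hrev]
  simp only [List.foldl_cons, List.nil_append]
  have hfirst : (if L.length - 1 < L.length - 1 ∧ pvGl L (L.length - 1 + 1) ≤ pvGl L (L.length - 1)
      then (0 : Int) + 1 else 1) = pvDecl L (L.length - 1) := by
    rw [if_neg (by omega), pvDecl, dif_neg (by intro hcon; omega)]
  rw [hfirst]
  rw [decFold L (L.length - 1) (by omega) [pvDecl L (L.length - 1)]]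
  simp only [List.singleton_append]
  have hdec : (((pvDecl L (L.length - 1) :: (List.range (L.length - 1)).reverse.map (pvDecl L))).reverse)
      = (List.range L.length).map (pvDecl L) := by
    rw [← List.map_cons, ← hrev, List.map_reverse, List.reverse_reverse]
  rw [hdec]
  have hmap : (List.range L.length).map
      (fun i => ((List.range L.length).map (pvIncl L)).getD i 0 +
        ((List.range L.length).map (pvDecl L)).getD i 0 - 1)
      = (List.range L.length).map (pvV L) := by
    apply List.map_congr_left
    intro i hi
    have hi' : i < L.length := List.mem_range.mp hi
    rw [mapRange_getD _ _ _ hi', mapRange_getD _ _ _ hi']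
    rfl
  rw [hmap]
  show pvMx ((List.range L.length).map (pvV L)) = pvM L 0
  rw [List.range_eq_range']
  rw [show List.range' 0 L.length = List.range' 0 ((L.length - 1) + 1) by congr 1; omega]
  exact mx_map_range' L (L.length - 1) 0 (by omega)

-- ===== VERDICT (by name: the statement is the Claim_ definition above) =====
theorem maxunimod_spec : Claim_equal_maxunimod := by
  intro L _hd hpre
  unfold Spec_maxunimod
  rw [portA_eq_M L hpre, portB_eq_M L hpre]
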